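-- pv_equiv track=rewrite | github.com/openlobby/openlobby-app | olapp/core/utils.py | shorten_pages
-- ===== SOURCE A (Python) =====
-- def shorten_pages(page, pages, total_pages):
--     if total_pages <= 20:
--         return pages
--
--     items = [1, total_pages]
--     for offset in [-5, -4, -3, -2, -1, 0, 1, 2, 3, 4, 5]:
--         i = page + offset
--         if i not in items and 0 < i <= total_pages:
--             items.append(i)
--
--     out = []
--     last = 0
--     for i in sorted(items):
--         if i - last > 1:
--             out.append(None)
--         out.append(pages[i-1])
--         last = i
--
--     return out
-- ===== SOURCE B (Python) =====
-- def shorten_pages(page, pages, total_pages):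
--     if total_pages <= 20:
--         return pages
--
--     out = []
--     last = 0
--     for i in range(1, total_pages + 1):
--         if i == 1 or i == total_pages or abs(i - page) <= 5:
--             if i - last > 1:
--                 out.append(None)
--             out.append(pages[i - 1])
--             last = i
--     return out
-- ===== Notes on version B (the rewrite author's own statement) =====
-- stated objective: simpler
-- what changed: Replaces A's build-a-candidate-list-then-sort-then-emit strategy with a single linear scan over range(1, total_pages+1) that emits kept pages and ellipsis markers directly, with no intermediate items list and no sort.
import Mathlib
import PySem

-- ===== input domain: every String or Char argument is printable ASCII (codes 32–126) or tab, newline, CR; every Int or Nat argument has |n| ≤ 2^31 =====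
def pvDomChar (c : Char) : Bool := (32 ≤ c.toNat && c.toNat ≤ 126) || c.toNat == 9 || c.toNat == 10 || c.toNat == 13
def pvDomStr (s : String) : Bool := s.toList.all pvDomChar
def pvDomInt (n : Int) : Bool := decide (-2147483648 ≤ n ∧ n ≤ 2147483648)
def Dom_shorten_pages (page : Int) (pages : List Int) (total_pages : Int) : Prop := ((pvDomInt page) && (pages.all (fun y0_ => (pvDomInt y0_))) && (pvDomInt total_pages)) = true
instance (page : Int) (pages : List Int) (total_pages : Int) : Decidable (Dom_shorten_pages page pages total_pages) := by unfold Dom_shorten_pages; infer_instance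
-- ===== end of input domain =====

-- B replaces A's candidate-list-plus-sort construction by a single linear scan over
-- range(1, total_pages+1) emitting pages and ellipses directly (simpler, no sort).


-- ===== PORT A =====
-- pages[i-1] is ported as appending PySem.List.pyGet? pages (i-1) (the output element
-- type is Option Int); inside Pre_ every index used is in range, so this is exactly
-- Python's appended value; out of range Python raises IndexError (excluded by Pre_).
def shorten_pages (page : Int) (pages : List Int) (total_pages : Int) : List (Option Int) :=
  if total_pages ≤ 20 then pages.map some
  else
    let items := [(-5 : Int), -4, -3, -2, -1, 0, 1, 2, 3, 4, 5].foldl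
      (fun items offset =>
        if (page + offset) ∉ items ∧ 0 < page + offset ∧ page + offset ≤ total_pages
        then items ++ [page + offset] else items)
      [1, total_pages]
    ((PySem.List.sorted items (fun x => x) false).foldl
      (fun s i =>
        ((if i - s.2 > 1 then s.1 ++ [(none : Option Int)] else s.1)
            ++ [PySem.List.pyGet? pages (i - 1)], i))
      (([] : List (Option Int)), (0 : Int))).1

-- ===== PORT B =====
def shorten_pages_alt (page : Int) (pages : List Int) (total_pages : Int) : List (Option Int) :=
  if total_pages ≤ 20 then pages.map some
  else
    ((PySem.List.pyRange 1 (total_pages + 1) 1).foldl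
      (fun s i =>
        if i = 1 ∨ i = total_pages ∨ |i - page| ≤ 5 then
          ((if i - s.2 > 1 then s.1 ++ [(none : Option Int)] else s.1)
              ++ [PySem.List.pyGet? pages (i - 1)], i)
        else s)
      (([] : List (Option Int)), (0 : Int))).1

-- ===== PRECONDITION & SPEC =====
-- Pre_ excludes exactly the inputs on which Python A raises IndexError:
-- total_pages > 20 while pages has fewer than total_pages entries (A indexes pages[total_pages-1]).
def Pre_shorten_pages (page : Int) (pages : List Int) (total_pages : Int) : Prop :=
  total_pages ≤ 20 ∨ total_pages ≤ (pages.length : Int)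
instance (page : Int) (pages : List Int) (total_pages : Int) : Decidable (Pre_shorten_pages page pages total_pages) := by unfold Pre_shorten_pages; infer_instance

def pvWitness_shorten_pages : Int × List Int × Int :=
  (7, [1, 2, 3, 4, 5, 6, 7, 8, 9, 10, 11, 12, 13, 14, 15, 16, 17, 18, 19, 20, 21, 22, 23, 24, 25], 25)

def Spec_shorten_pages (page : Int) (pages : List Int) (total_pages : Int) (out : List (Option Int)) : Prop := out = shorten_pages_alt page pages total_pages
instance (page : Int) (pages : List Int) (total_pages : Int) (out : List (Option Int)) : Decidable (Spec_shorten_pages page pages total_pages out) := by unfold Spec_shorten_pages; infer_instance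

-- ===== CLAIM (what is proved, stated in full; the proofs are below) =====
def Claim_equal_shorten_pages : Prop := ∀ (page : Int) (pages : List Int) (total_pages : Int), Dom_shorten_pages page pages total_pages → Pre_shorten_pages page pages total_pages → Spec_shorten_pages page pages total_pages (shorten_pages page pages total_pages)

-- ===== LEMMAS AND PROOFS =====

-- one step of A's candidate-building loop, as a membership statement
theorem mem_items_step (page total_pages : Int) (init : List Int) (o x : Int) :
    (x ∈ (if (page + o) ∉ init ∧ 0 < page + o ∧ page + o ≤ total_pages
           then init ++ [page + o] else init)) ↔
      x ∈ init ∨ (x = page + o ∧ 0 < x ∧ x ≤ total_pages) := by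
  split_ifs with hc
  · simp only [List.mem_append, List.mem_singleton]
    constructor
    · rintro (h | rfl)
      · exact Or.inl h
      · exact Or.inr ⟨rfl, hc.2⟩
    · rintro (h | ⟨rfl, _⟩)
      · exact Or.inl h
      · exact Or.inr rfl
  · constructor
    · exact Or.inl
    · rintro (h | ⟨rfl, h1, h2⟩)
      · exact h
      · by_cases hm : (page + o) ∈ init
        · exact hm
        · exact absurd ⟨hm, h1, h2⟩ hc

-- membership in A's candidate list
theorem mem_items_fold (page total_pages : Int) (L : List Int) (init : List Int) (x : Int) :
    (x ∈ L.foldl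
      (fun items offset =>
        if (page + offset) ∉ items ∧ 0 < page + offset ∧ page + offset ≤ total_pages
        then items ++ [page + offset] else items)
      init) ↔ x ∈ init ∨ ∃ o ∈ L, x = page + o ∧ 0 < x ∧ x ≤ total_pages := by
  induction L generalizing init with
  | nil => simp
  | cons o L ih =>
    rw [List.foldl_cons, ih, mem_items_step, List.exists_mem_cons_iff]
    tauto

-- A's candidate list has no duplicates
theorem nodup_items_fold (page total_pages : Int) (L : List Int) (init : List Int)
    (h : init.Nodup) :
    (L.foldl
      (fun items offset =>
        if (page + offset) ∉ items ∧ 0 < page + offset ∧ page + offset ≤ total_pages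
        then items ++ [page + offset] else items)
      init).Nodup := by
  induction L generalizing init with
  | nil => exact h
  | cons o L ih =>
    rw [List.foldl_cons]
    apply ih
    split_ifs with hc
    · refine h.append (List.nodup_singleton _) ?_
      intro a ha hb
      rw [List.mem_singleton] at hb
      subst hb
      exact hc.1 ha
    · exact h

-- the sorted candidate list IS the filtered range B scans
theorem sorted_items_eq (page total_pages : Int) (h20 : ¬ total_pages ≤ 20) :
    PySem.List.sorted
      ([(-5 : Int), -4, -3, -2, -1, 0, 1, 2, 3, 4, 5].foldl
        (fun items offset =>
          if (page + offset) ∉ items ∧ 0 < page + offset ∧ page + offset ≤ total_pages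
          then items ++ [page + offset] else items)
        [1, total_pages]) (fun x => x) false
      = (PySem.List.pyRange 1 (total_pages + 1) 1).filter
          (fun i => decide (i = 1 ∨ i = total_pages ∨ |i - page| ≤ 5)) := by
  apply PySem.List.sorted_eq_of_perm_of_pairwise_lt
  · rw [List.perm_ext_iff_of_nodup
      ((PySem.List.nodup_pyRange_one 1 (total_pages + 1)).filter _)
      (nodup_items_fold page total_pages _ _ (by simp; omega))]
    intro x
    rw [List.mem_filter, PySem.List.mem_pyRange_one, mem_items_fold]
    simp only [List.mem_cons, List.not_mem_nil, or_false, decide_eq_true_eq, abs_le]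
    constructor
    · rintro ⟨⟨h1, h2⟩, h3 | h3 | ⟨h4, h5⟩⟩
      · exact Or.inl (Or.inl h3)
      · exact Or.inl (Or.inr h3)
      · exact Or.inr ⟨x - page, by omega, by omega, by omega, by omega⟩
    · rintro (h | ⟨o, ho, rfl, hb1, hb2⟩)
      · omega
      · omega
  · exact (PySem.List.pairwise_lt_pyRange_one 1 (total_pages + 1)).filter _

-- ===== VERDICT (by name: the statement is the Claim_ definition above) =====
theorem shorten_pages_spec : Claim_equal_shorten_pages := by
  intro page pages total_pages _ _
  unfold Spec_shorten_pages shorten_pages shorten_pages_alt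
  by_cases h : total_pages ≤ 20
  · rw [if_pos h, if_pos h]
  · rw [if_neg h, if_neg h]
    simp only []
    rw [PySem.List.foldl_ite_eq_foldl_filter, sorted_items_eq page total_pages h]
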